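-- pv_equiv track=rewrite | github.com/Mrk1869/TopCoder | archives/155-21-Quipu.py | readKnots
-- ===== SOURCE A (Python) =====
-- def readKnots(knots):
--
--     last_val = "o"
--     res = ""
--     num_count = 0
--
--     for val in knots:
--
--         if val == "-":
--             if num_count != 0:
--                 res = res + str(num_count)
--                 num_count = 0
--             if last_val == "-":
--                 res = res + "0"
--
--         elif val == "X":
--             num_count += 1
--
--         last_val = val
--
--     return int(res)
-- ===== SOURCE B (Python) =====
-- def readKnots(knots):
--     groups = knots.split('-')
--     groups.pop()  # the part after the last '-' is never flushed by the original
--     res = []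
--     for i, g in enumerate(groups):
--         c = g.count('X')
--         if c != 0:
--             res.append(str(c))
--         elif g == '' and i != 0:
--             res.append('0')
--     return int(''.join(res))
-- ===== Notes on version B (the rewrite author's own statement) =====
-- stated objective: simpler
-- what changed: Replaced the char-by-char state machine (last_val/res/num_count mutated per character) by splitting the string on '-' once and emitting one digit per group before a dash (its X-count, or '0' for an empty non-leading group), joining and converting at the end.
-- outside the precondition, e.g. on readKnots(''): A raises ValueError, B raises ValueError; on readKnots('-'): A raises ValueError, B raises ValueError
import Mathlib
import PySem

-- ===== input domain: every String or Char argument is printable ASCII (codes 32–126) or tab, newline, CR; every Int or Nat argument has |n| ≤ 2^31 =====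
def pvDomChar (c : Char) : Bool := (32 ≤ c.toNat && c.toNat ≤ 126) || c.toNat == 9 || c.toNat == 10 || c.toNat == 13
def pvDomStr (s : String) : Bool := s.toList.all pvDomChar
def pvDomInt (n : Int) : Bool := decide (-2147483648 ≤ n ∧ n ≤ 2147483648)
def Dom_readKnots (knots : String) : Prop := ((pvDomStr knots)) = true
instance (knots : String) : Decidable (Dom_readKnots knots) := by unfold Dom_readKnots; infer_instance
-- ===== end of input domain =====

-- B re-implements the char-by-char state machine as a split-into-groups pass (objective: simpler decomposition, same cost).

-- ===== PORT A =====
-- state: (last_val, res, num_count); res as List Char; int(res) = PySem.Int.ofChars? (Pre_ excludes res = "", where Python raises ValueError)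
def readKnotsStep (st : Char × List Char × Int) (v : Char) : Char × List Char × Int :=
  let last := st.1
  let res := st.2.1
  let cnt := st.2.2
  if v = '-' then
    let res := if cnt ≠ 0 then res ++ PySem.Int.toChars cnt else res
    let cnt : Int := if cnt ≠ 0 then 0 else cnt
    let res := if last = '-' then res ++ ['0'] else res
    (v, res, cnt)
  else if v = 'X' then (v, res, cnt + 1)
  else (v, res, cnt)

def readKnots (knots : String) : Int :=
  let st := knots.toList.foldl readKnotsStep ('o', [], 0)
  (PySem.Int.ofChars? st.2.1).getD 0

-- ===== PORT B =====
-- one loop body of Source B: i-th group g contributes str(count) / "0" / nothing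
def readKnotsAltBody (acc : List (List Char)) (ig : Int × List Char) : List (List Char) :=
  let c := ig.2.count 'X'
  if c ≠ 0 then acc ++ [PySem.Int.toChars (c : Int)]
  else if ig.2 = [] ∧ ig.1 ≠ 0 then acc ++ [['0']]
  else acc

def readKnots_alt (knots : String) : Int :=
  let groups := (List.splitOn '-' knots.toList).dropLast  -- knots.split('-'); groups.pop()
  let res := (PySem.List.enumerate groups).foldl readKnotsAltBody []
  (PySem.Int.ofChars? (PySem.Chars.join [] res)).getD 0   -- int(''.join(res))

-- ===== PRECONDITION & SPEC =====
-- Pre_ excludes exactly the inputs on which Python's int("") raises ValueError in BOTH programs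
-- (no digit is ever emitted: no '-' preceded by an 'X' somewhere before it, and no "--").
def Pre_readKnots (knots : String) : Prop :=
  ∃ i < knots.toList.length, knots.toList.getD i ' ' = '-' ∧
    ('X' ∈ knots.toList.take i ∨ (0 < i ∧ knots.toList.getD (i - 1) ' ' = '-'))
instance (knots : String) : Decidable (Pre_readKnots knots) := by unfold Pre_readKnots; infer_instance

def pvWitness_readKnots : String := "X-"

def Spec_readKnots (knots : String) (out : Int) : Prop := out = readKnots_alt knots
instance (knots : String) (out : Int) : Decidable (Spec_readKnots knots out) := by unfold Spec_readKnots; infer_instance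

-- ===== CLAIM (what is proved, stated in full; the proofs are below) =====
def Claim_equal_readKnots : Prop := ∀ (knots : String), Dom_readKnots knots → Pre_readKnots knots → Spec_readKnots knots (readKnots knots)

-- ===== LEMMAS AND PROOFS =====

-- what A's flushes emit for the group list: last group (after the final '-') is never flushed
def emitC : Int → Char → List (List Char) → List Char
  | _, _, [] => []
  | _, _, [_] => []
  | cnt, last, g :: gs =>
    (if cnt + (g.count 'X' : Int) ≠ 0 then PySem.Int.toChars (cnt + (g.count 'X' : Int)) else []) ++
    (if g.getLastD last = '-' then ['0'] else []) ++ emitC 0 '-' gs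

theorem splitOnP_ne_nil' {α : Type} (p : α → Bool) (l : List α) : List.splitOnP p l ≠ [] := by
  induction l with
  | nil => simp [List.splitOnP_nil]
  | cons x xs ih =>
    rw [List.splitOnP_cons]
    split_ifs
    · simp
    · cases h : List.splitOnP p xs with
      | nil => exact absurd h ih
      | cons g gs => simp


theorem not_mem_splitOn (cs : List Char) : ∀ g ∈ List.splitOn '-' cs, '-' ∉ g := by
  induction cs with
  | nil => simp [List.splitOn, List.splitOnP_nil]
  | cons c cs ih =>
    simp only [List.splitOn, List.splitOnP_cons] at *
    by_cases hc : c = '-'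
    · rw [if_pos (by simp [hc])]
      intro g hg
      rcases List.mem_cons.mp hg with hg | hg
      · simp [hg]
      · exact ih g hg
    · rw [if_neg (by simp [hc])]
      cases h : List.splitOnP (fun x => x == '-') cs with
      | nil => exact absurd h (splitOnP_ne_nil' _ _)
      | cons g gs =>
        rw [h] at ih
        intro g' hg'
        simp only [List.modifyHead, List.mem_cons] at hg'
        rcases hg' with hg' | hg'
        · subst hg'
          simp only [List.mem_cons, not_or]
          exact ⟨fun he => hc he.symm, ih g (by simp)⟩
        · exact ih g' (by simp [hg'])

theorem splitOn_ne_nil' (cs : List Char) : List.splitOn '-' cs ≠ [] :=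
  splitOnP_ne_nil' _ _

theorem foldA_emitC (cs : List Char) : ∀ (last : Char) (res : List Char) (cnt : Int),
    (cs.foldl readKnotsStep (last, res, cnt)).2.1 = res ++ emitC cnt last (List.splitOn '-' cs) := by
  induction cs with
  | nil =>
    intro last res cnt
    simp [List.splitOn, List.splitOnP_nil, emitC]
  | cons c cs ih =>
    intro last res cnt
    rw [List.foldl_cons]
    by_cases hc : c = '-'
    · subst hc
      rw [show readKnotsStep (last, res, cnt) '-' =
            ('-', (if cnt ≠ 0 then res ++ PySem.Int.toChars cnt else res) ++
                  (if last = '-' then ['0'] else []), 0) from by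
            by_cases h1 : cnt = 0 <;> by_cases h2 : last = '-' <;>
              simp [readKnotsStep, h1, h2]]
      rw [ih]
      rw [show List.splitOn '-' ('-' :: cs) = [] :: List.splitOn '-' cs from by
            simp [List.splitOn, List.splitOnP_cons]]
      cases h : List.splitOn '-' cs with
      | nil => exact absurd h (splitOn_ne_nil' _)
      | cons g gs =>
        simp only [emitC, List.count_nil, List.getLastD_nil, Nat.cast_zero, add_zero]
        by_cases h1 : cnt = 0 <;> by_cases h2 : last = '-' <;>
          simp [h1, h2, List.append_assoc]
    · rw [show readKnotsStep (last, res, cnt) c =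
            (c, res, cnt + if c = 'X' then 1 else 0) from by
            by_cases hx : c = 'X' <;> simp [readKnotsStep, hc, hx]]
      rw [ih]
      rw [show List.splitOn '-' (c :: cs) = List.modifyHead (c :: ·) (List.splitOn '-' cs) from by
            simp [List.splitOn, List.splitOnP_cons, hc]]
      cases h : List.splitOn '-' cs with
      | nil => exact absurd h (splitOn_ne_nil' _)
      | cons g gs =>
        cases gs with
        | nil => rfl
        | cons g' gs' =>
          simp only [List.modifyHead, emitC, List.count_cons, List.getLastD_cons]
          have hcount : ((g.count 'X' + if (c == 'X') = true then 1 else 0 : Nat) : Int) =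
              (g.count 'X' : Int) + (if c = 'X' then (1:Int) else 0) := by
            by_cases hx : c = 'X' <;> simp [hx]
          rw [hcount]
          rw [show cnt + (if c = 'X' then (1:Int) else 0) + (g.count 'X' : Int) =
                cnt + ((g.count 'X' : Int) + (if c = 'X' then (1:Int) else 0)) from by ring]

theorem join_nil_flatten (l : List (List Char)) : PySem.Chars.join [] l = l.flatten := by
  induction l with
  | nil => simp [PySem.Chars.join, List.intercalate]
  | cons a t ih =>
    cases t with
    | nil => simp [PySem.Chars.join, List.intercalate]
    | cons b t' =>
      rw [PySem.Chars.join_cons_cons, ih]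
      simp

theorem getLastD_mem' (l : List Char) (d : Char) (h : l ≠ []) : l.getLastD d ∈ l := by
  rw [List.getLastD_eq_getLast?, List.getLast?_eq_some_getLast h]
  exact List.getLast_mem h

theorem foldB_emitC (gs : List (List Char)) : ∀ (i : Int) (last : Char) (acc : List (List Char)),
    0 ≤ i → (last = '-' ↔ i ≠ 0) → (∀ g ∈ gs, '-' ∉ g) →
    PySem.Chars.join [] ((PySem.List.enumerate gs.dropLast i).foldl readKnotsAltBody acc) =
      PySem.Chars.join [] acc ++ emitC 0 last gs := by
  induction gs with
  | nil =>
    intro i last acc _ _ _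
    simp [emitC]
  | cons g gs ih =>
    intro i last acc hi hlast hnd
    cases gs with
    | nil => simp [emitC]
    | cons g' gs' =>
      rw [show (g :: g' :: gs').dropLast = g :: (g' :: gs').dropLast from rfl,
          PySem.List.enumerate_cons, List.foldl_cons]
      rw [ih (i + 1) '-' (readKnotsAltBody acc (i, g)) (by omega) (by simp; omega)
            (fun h hh => hnd h (by simp [hh]))]
      have hg : '-' ∉ g := hnd g (by simp)
      have hpiece : PySem.Chars.join [] (readKnotsAltBody acc (i, g)) =
          PySem.Chars.join [] acc ++
          ((if (0:Int) + (g.count 'X' : Int) ≠ 0 then PySem.Int.toChars ((0:Int) + (g.count 'X' : Int)) else []) ++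
           (if g.getLastD last = '-' then ['0'] else [])) := by
        simp only [join_nil_flatten, readKnotsAltBody]
        by_cases hcnt : g.count 'X' = 0
        · by_cases hgnil : g = []
          · subst hgnil
            by_cases hi0 : i = 0
            · have hl : ¬ last = '-' := by rw [hlast]; simp [hi0]
              simp [hcnt, hi0, hl]
            · have hl : last = '-' := hlast.mpr hi0
              simp [hcnt, hi0, hl]
          · have hne : g.getLastD last ≠ '-' := fun he => hg (he ▸ getLastD_mem' g last hgnil)
            rw [List.getLastD_eq_getLast?] at hne
            simp [hcnt, hgnil, hne]
        · have hgnil : g ≠ [] := by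
            intro he; subst he; simp at hcnt
          have hne : g.getLastD last ≠ '-' := fun he => hg (he ▸ getLastD_mem' g last hgnil)
          rw [List.getLastD_eq_getLast?] at hne
          simp [hcnt, hne]
      rw [hpiece]
      simp only [emitC, List.append_assoc]

-- ===== VERDICT (by name: the statement is the Claim_ definition above) =====
theorem readKnots_spec : Claim_equal_readKnots := by
  intro knots _ _
  show readKnots knots = readKnots_alt knots
  unfold readKnots readKnots_alt
  simp only []
  rw [foldA_emitC, foldB_emitC _ 0 'o' [] le_rfl (by simp) (not_mem_splitOn _)]
  simp [PySem.Chars.join, List.intercalate]
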